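-- pv_equiv track=rewrite | github.com/ARYANJATHAR/Ai_Career_Advisor | app.py | parse_certifications
-- ===== SOURCE A (Python) =====
-- def parse_certifications(content):
--     """Parse certification content to group details by certification"""
--     lines = content.split('\n')
--     cert_groups = []
--     current_cert = []
--
--     # Check if content follows the format from the screenshot with dashes
--     has_cert_headers = any(line.strip().startswith('- ') for line in lines)
--
--     if has_cert_headers:
--         cert_name = ""
--         cert_details = []
--
--         for i, line in enumerate(lines):
--             line = line.strip()
--             if not line:
--                 continue
--
--             if line.startswith('- ') and not any(detail in line.lower() for detail in ['difficulty level', 'time commitment', 'cost range']):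
--                 # This is a new certificate name
--                 if cert_name:
--                     # Save the previous certificate
--                     cert_groups.append([f"* {cert_name}"] + cert_details)
--
--                 cert_name = line[2:].strip()
--                 cert_details = []
--             elif line.startswith('- '):
--                 # This is a detail for the current certificate
--                 cert_details.append(line)
--
--         # Add the last certificate
--         if cert_name:
--             cert_groups.append([f"* {cert_name}"] + cert_details)
--     else:
--         # Fall back to original parsing
--         in_cert = False
--         for line in lines:
--             if line.strip().startswith('*'):
--                 if in_cert and current_cert:
--                     cert_groups.append(current_cert)
--                 in_cert = True
--                 current_cert = [line]
--             elif in_cert and line.strip():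
--                 current_cert.append(line)
--
--         if current_cert:
--             cert_groups.append(current_cert)
--
--     return cert_groups
-- ===== SOURCE B (Python) =====
-- def parse_certifications(content):
--     """Parse certification content to group details by certification (recursive-descent decomposition)"""
--     lines = content.split('\n')
--     keywords = ('difficulty level', 'time commitment', 'cost range')
--
--     def is_header(s):
--         return s.startswith('- ') and not any(k in s.lower() for k in keywords)
--
--     stripped = [ln.strip() for ln in lines]
--
--     if any(s.startswith('- ') for s in stripped):
--         def parse(items):
--             if not items:
--                 return []
--             name = items[0][2:].strip()
--             details = []
--             i = 1
--             while i < len(items) and not is_header(items[i]):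
--                 if items[i].startswith('- '):
--                     details.append(items[i])
--                 i += 1
--             return [['* ' + name] + details] + parse(items[i:])
--
--         k = 0
--         while k < len(stripped) and not is_header(stripped[k]):
--             k += 1
--         return parse(stripped[k:])
--     else:
--         def parse2(items):
--             if not items:
--                 return []
--             group = [items[0]]
--             i = 1
--             while i < len(items) and not items[i].strip().startswith('*'):
--                 if items[i].strip():
--                     group.append(items[i])
--                 i += 1
--             return [group] + parse2(items[i:])
--
--         k = 0
--         while k < len(lines) and not lines[k].strip().startswith('*'):
--             k += 1
--         return parse2(lines[k:])
-- ===== Notes on version B (the rewrite author's own statement) =====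
-- stated objective: alternative
-- what changed: A's single pass with running cert_name/current_cert accumulators and flush-on-next-boundary is replaced by a recursive descent that skips to the first boundary line ('- ' header resp. '*' line) and emits one complete group per boundary by collecting its following detail lines.
import Mathlib
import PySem

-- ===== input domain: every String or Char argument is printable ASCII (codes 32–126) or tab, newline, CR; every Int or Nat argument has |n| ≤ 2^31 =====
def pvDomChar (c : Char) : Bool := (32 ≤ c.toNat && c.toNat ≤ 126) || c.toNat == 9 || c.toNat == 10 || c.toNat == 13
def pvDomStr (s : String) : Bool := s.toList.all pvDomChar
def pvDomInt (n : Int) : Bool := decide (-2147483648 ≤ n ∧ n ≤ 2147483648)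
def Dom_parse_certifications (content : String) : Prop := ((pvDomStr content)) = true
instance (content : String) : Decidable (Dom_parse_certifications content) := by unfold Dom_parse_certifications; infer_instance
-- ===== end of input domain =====

-- B replaces A's running-accumulator-and-flush loops by a recursive descent that jumps to the
-- first boundary line and emits one group per boundary; same values, different decomposition
-- (objective: alternative, not faster).

-- ===== PORT A =====
-- A's inner loops as structural recursions over the remaining lines, same state as the Python
-- (cert_name, cert_details, cert_groups) resp. (in_cert, current_cert, cert_groups).
def pvDetailKeywords : List String := ["difficulty level", "time commitment", "cost range"]

def pvLoopHeaders : List String → String → List String → List (List String) → List (List String)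
  | [], name, det, gs => if name ≠ "" then gs ++ [("* " ++ name) :: det] else gs
  | l :: rest, name, det, gs =>
    -- Python rebinds line = line.strip(); we write PySem.Str.strip l for it below
    if PySem.Str.strip l = "" then pvLoopHeaders rest name det gs
    else if (PySem.Str.startswith (PySem.Str.strip l) "- "
              && !(pvDetailKeywords.any
                    (fun d => PySem.Str.isIn d (PySem.Str.lower (PySem.Str.strip l))))) = true then
      pvLoopHeaders rest
        (PySem.Str.strip (PySem.Str.slice (PySem.Str.strip l) (some 2) none)) []
        (if name ≠ "" then gs ++ [("* " ++ name) :: det] else gs)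
    else if PySem.Str.startswith (PySem.Str.strip l) "- " = true then
      pvLoopHeaders rest name (det ++ [PySem.Str.strip l]) gs
    else pvLoopHeaders rest name det gs

def pvLoopFallback : List String → Bool → List String → List (List String) → List (List String)
  | [], _, cur, gs => if cur ≠ [] then gs ++ [cur] else gs
  | l :: rest, inC, cur, gs =>
    if PySem.Str.startswith (PySem.Str.strip l) "*" = true then
      pvLoopFallback rest true [l] (if inC = true ∧ cur ≠ [] then gs ++ [cur] else gs)
    else if inC = true ∧ PySem.Str.strip l ≠ "" then
      pvLoopFallback rest inC (cur ++ [l]) gs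
    else pvLoopFallback rest inC cur gs

def parse_certifications (content : String) : List (List String) :=
  -- sep is the literal "\n" ≠ "", so split? is always some; getD is never the default
  let lines := (PySem.Str.split? content "\n").getD []
  if lines.any (fun l => PySem.Str.startswith (PySem.Str.strip l) "- ") = true then
    pvLoopHeaders lines "" [] []
  else
    pvLoopFallback lines false [] []

-- ===== PORT B =====
def pvIsHeaderB (s : String) : Bool :=
  PySem.Str.startswith s "- "
    && !(["difficulty level", "time commitment", "cost range"].any
          (fun k => PySem.Str.isIn k (PySem.Str.lower s)))

-- Source B's inner while loop of `parse`: collect the '- ' detail lines before the next header,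
-- return them with the remaining suffix (which starts at that header, or is empty).
def pvTakeDetails : List String → List String × List String
  | [] => ([], [])
  | s :: r =>
    if pvIsHeaderB s then ([], s :: r)
    else
      (if PySem.Str.startswith s "- " then s :: (pvTakeDetails r).1 else (pvTakeDetails r).1,
       (pvTakeDetails r).2)

lemma pvTakeDetails_len (l : List String) : (pvTakeDetails l).2.length ≤ l.length := by
  induction l with
  | nil => simp [pvTakeDetails]
  | cons s r ih =>
    simp only [pvTakeDetails]
    split_ifs <;> simp <;> omega

-- Source B's recursive `parse`: items starts with a header line (or is empty)
def pvParseHeaderGroups : List String → List (List String)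
  | [] => []
  | h :: rest =>
    (("* " ++ PySem.Str.strip (PySem.Str.slice h (some 2) none)) :: (pvTakeDetails rest).1)
      :: pvParseHeaderGroups (pvTakeDetails rest).2
  termination_by l => l.length
  decreasing_by
    simp only [List.length_cons]
    exact Nat.lt_succ_of_le (pvTakeDetails_len rest)

-- Source B's inner while loop of `parse2`: collect the non-empty lines (unstripped) before the next '*' line
def pvTakeGroup : List String → List String × List String
  | [] => ([], [])
  | l :: r =>
    if PySem.Str.startswith (PySem.Str.strip l) "*" then ([], l :: r)
    else
      (if PySem.Str.strip l ≠ "" then l :: (pvTakeGroup r).1 else (pvTakeGroup r).1,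
       (pvTakeGroup r).2)

lemma pvTakeGroup_len (l : List String) : (pvTakeGroup l).2.length ≤ l.length := by
  induction l with
  | nil => simp [pvTakeGroup]
  | cons s r ih =>
    simp only [pvTakeGroup]
    split_ifs <;> simp <;> omega

-- Source B's recursive `parse2`
def pvParseStarGroups : List String → List (List String)
  | [] => []
  | h :: rest => (h :: (pvTakeGroup rest).1) :: pvParseStarGroups (pvTakeGroup rest).2
  termination_by l => l.length
  decreasing_by
    simp only [List.length_cons]
    exact Nat.lt_succ_of_le (pvTakeGroup_len rest)

def parse_certifications_alt (content : String) : List (List String) :=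
  -- sep is the literal "\n" ≠ "", so split? is always some; getD is never the default
  let lines := (PySem.Str.split? content "\n").getD []
  let stripped := lines.map PySem.Str.strip
  if stripped.any (fun s => PySem.Str.startswith s "- ") then
    pvParseHeaderGroups (stripped.dropWhile (fun s => !pvIsHeaderB s))
  else
    pvParseStarGroups (lines.dropWhile (fun l => !PySem.Str.startswith (PySem.Str.strip l) "*"))

-- ===== PRECONDITION & SPEC =====
def Spec_parse_certifications (content : String) (out : List (List String)) : Prop := out = parse_certifications_alt content
instance (content : String) (out : List (List String)) : Decidable (Spec_parse_certifications content out) := by unfold Spec_parse_certifications; infer_instance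

-- ===== CLAIM (what is proved, stated in full; the proofs are below) =====
def Claim_equal_parse_certifications : Prop := ∀ (content : String), Dom_parse_certifications content → Spec_parse_certifications content (parse_certifications content)

-- ===== LEMMAS AND PROOFS =====

-- If strip u = [] then u is all whitespace.
lemma pv_all_isspace_of_strip_nil (u : List Char) (h : PySem.Chars.strip u = []) :
    ∀ c ∈ u, PySem.Chars.isspace c = true := by
  unfold PySem.Chars.strip PySem.Chars.rstrip PySem.Chars.lstrip at h
  rw [List.reverse_eq_nil_iff, List.dropWhile_eq_nil_iff] at h
  intro c hc
  rcases List.mem_append.mp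
      ((List.takeWhile_append_dropWhile (p := PySem.Chars.isspace) (l := u)) ▸ hc) with h1 | h1
  · exact List.mem_takeWhile_imp h1
  · exact h c (by simpa using h1)

-- the last character of a stripped string is not whitespace
lemma pv_strip_last (cs : List Char) (c : Char)
    (h : (PySem.Chars.strip cs).getLast? = some c) : PySem.Chars.isspace c = false := by
  unfold PySem.Chars.strip PySem.Chars.rstrip at h
  rw [List.getLast?_reverse] at h
  have hne : List.dropWhile PySem.Chars.isspace (PySem.Chars.lstrip cs).reverse ≠ [] := by
    intro e; rw [e] at h; simp at h
  have h2 := List.head_dropWhile_not PySem.Chars.isspace hne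
  rw [List.head?_eq_some_head hne] at h
  rw [← Option.some_inj.mp h]
  exact h2

-- A stripped line that starts with "- " has a non-space last character, hence the text after
-- the dash does not strip to nothing: the certificate name A extracts is never falsy.
lemma pv_name_ne_nil (cs u : List Char) (h : PySem.Chars.strip cs = '-' :: ' ' :: u) :
    PySem.Chars.strip u ≠ [] := by
  intro hnil
  have hall := pv_all_isspace_of_strip_nil u hnil
  by_cases hu : u = []
  · subst hu
    have hsp : PySem.Chars.isspace ' ' = false := by
      apply pv_strip_last cs; rw [h]; rfl
    exact absurd hsp (by decide)
  · have hsp : PySem.Chars.isspace (u.getLast hu) = false := by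
      apply pv_strip_last cs
      rw [h, List.getLast?_cons_cons]
      cases u with
      | nil => exact absurd rfl hu
      | cons d u' => rw [List.getLast?_cons_cons]; exact List.getLast?_eq_some_getLast hu
    exact absurd (hall _ (List.getLast_mem hu)) (by simp [hsp])

lemma pv_name_ne_empty (l : String)
    (h : PySem.Str.startswith (PySem.Str.strip l) "- " = true) :
    PySem.Str.strip (PySem.Str.slice (PySem.Str.strip l) (some 2) none) ≠ "" := by
  have h' : ['-', ' '] <+: PySem.Chars.strip l.toList := by
    rw [PySem.Str.startswith_eq] at h
    simpa [PySem.Str.toList_strip] using (PySem.Chars.startswith_iff _ _).mp (by simpa using h)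
  obtain ⟨t, ht⟩ := h'
  intro e
  have e2 : (PySem.Str.strip (PySem.Str.slice (PySem.Str.strip l) (some 2) none)).toList
      = [] := by rw [e]; rfl
  rw [PySem.Str.toList_strip, PySem.Str.toList_slice, PySem.Chars.slice_eq_listSlice,
      PySem.Str.toList_strip, PySem.List.slice_from _ (by norm_num), ← ht] at e2
  norm_num at e2
  exact pv_name_ne_nil l.toList t ht.symm e2

-- A's header test is B's is_header
lemma pv_headerB_eq (s : String) :
    (PySem.Str.startswith s "- "
      && !(pvDetailKeywords.any (fun d => PySem.Str.isIn d (PySem.Str.lower s))))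
      = pvIsHeaderB s := by
  simp only [pvIsHeaderB, pvDetailKeywords]

lemma pv_header_ne_empty (s : String) (h : pvIsHeaderB s = true) : s ≠ "" := by
  intro e; rw [e] at h; exact absurd h (by decide)

lemma pv_header_dash (s : String) (h : pvIsHeaderB s = true) :
    PySem.Str.startswith s "- " = true := by
  unfold pvIsHeaderB at h
  exact (Bool.and_eq_true_iff.mp h).1

-- inside a certificate: A's flush loop = group-so-far plus B's locate-and-emit of the rest
lemma pv_inner1 (ls : List String) : ∀ (name : String) (det : List String)
    (gs : List (List String)), name ≠ "" →
    pvLoopHeaders ls name det gs =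
      gs ++ ((("* " ++ name) :: (det ++ (pvTakeDetails (ls.map PySem.Str.strip)).1))
        :: pvParseHeaderGroups (pvTakeDetails (ls.map PySem.Str.strip)).2) := by
  induction ls with
  | nil => intro name det gs h; simp [pvLoopHeaders, pvTakeDetails, pvParseHeaderGroups, h]
  | cons l rest ih =>
    intro name det gs h
    by_cases hhd : pvIsHeaderB (PySem.Str.strip l) = true
    · have hemp := pv_header_ne_empty _ hhd
      rw [show pvLoopHeaders (l :: rest) name det gs
            = pvLoopHeaders rest
                (PySem.Str.strip (PySem.Str.slice (PySem.Str.strip l) (some 2) none)) []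
                (gs ++ [("* " ++ name) :: det]) by
          simp only [pvLoopHeaders]
          rw [pv_headerB_eq, if_neg hemp, if_pos hhd, if_pos h]]
      rw [ih _ [] _ (pv_name_ne_empty l (pv_header_dash _ hhd))]
      simp only [List.map_cons, pvTakeDetails, if_pos hhd, pvParseHeaderGroups]
      simp
    · by_cases hemp : PySem.Str.strip l = ""
      · rw [show pvLoopHeaders (l :: rest) name det gs = pvLoopHeaders rest name det gs by
            simp only [pvLoopHeaders]; rw [if_pos hemp]]
        rw [ih name det gs h]
        have hB : pvIsHeaderB (PySem.Str.strip l) = false := by rw [hemp]; decide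
        have hD : PySem.Str.startswith (PySem.Str.strip l) "- " = false := by rw [hemp]; decide
        simp only [List.map_cons, pvTakeDetails, hB, Bool.false_eq_true, if_false, hD]
      · by_cases hdash : PySem.Str.startswith (PySem.Str.strip l) "- " = true
        · rw [show pvLoopHeaders (l :: rest) name det gs
                = pvLoopHeaders rest name (det ++ [PySem.Str.strip l]) gs by
              simp only [pvLoopHeaders]
              rw [pv_headerB_eq, if_neg hemp, if_neg hhd, if_pos hdash]]
          rw [ih name (det ++ [PySem.Str.strip l]) gs h]
          simp only [List.map_cons, pvTakeDetails, if_neg hhd, if_pos hdash]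
          simp
        · rw [show pvLoopHeaders (l :: rest) name det gs = pvLoopHeaders rest name det gs by
              simp only [pvLoopHeaders]
              rw [pv_headerB_eq, if_neg hemp, if_neg hhd, if_neg hdash]]
          rw [ih name det gs h]
          simp only [List.map_cons, pvTakeDetails, if_neg hhd, if_neg hdash]

-- before the first header: A ignores everything, B drops it
lemma pv_outer1 (ls : List String) : ∀ (det : List String) (gs : List (List String)),
    pvLoopHeaders ls "" det gs =
      gs ++ pvParseHeaderGroups ((ls.map PySem.Str.strip).dropWhile (fun s => !pvIsHeaderB s)) := by
  induction ls with
  | nil => intro det gs; simp [pvLoopHeaders, pvParseHeaderGroups]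
  | cons l rest ih =>
    intro det gs
    by_cases hhd : pvIsHeaderB (PySem.Str.strip l) = true
    · have hemp := pv_header_ne_empty _ hhd
      rw [show pvLoopHeaders (l :: rest) "" det gs
            = pvLoopHeaders rest
                (PySem.Str.strip (PySem.Str.slice (PySem.Str.strip l) (some 2) none)) [] gs by
          simp only [pvLoopHeaders]
          rw [pv_headerB_eq, if_neg hemp, if_pos hhd, if_neg (by simp : ¬("" : String) ≠ "")]]
      rw [pv_inner1 rest _ [] gs (pv_name_ne_empty l (pv_header_dash _ hhd))]
      simp only [List.map_cons, List.dropWhile_cons, hhd, Bool.not_true, Bool.false_eq_true,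
        if_false, pvParseHeaderGroups]
      simp
    · have hB : (!pvIsHeaderB (PySem.Str.strip l)) = true := by simp [hhd]
      by_cases hemp : PySem.Str.strip l = ""
      · rw [show pvLoopHeaders (l :: rest) "" det gs = pvLoopHeaders rest "" det gs by
            simp only [pvLoopHeaders]; rw [if_pos hemp]]
        rw [ih det gs]
        simp only [List.map_cons, List.dropWhile_cons, hB, if_true]
      · by_cases hdash : PySem.Str.startswith (PySem.Str.strip l) "- " = true
        · rw [show pvLoopHeaders (l :: rest) "" det gs
                = pvLoopHeaders rest "" (det ++ [PySem.Str.strip l]) gs by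
              simp only [pvLoopHeaders]
              rw [pv_headerB_eq, if_neg hemp, if_neg hhd, if_pos hdash]]
          rw [ih (det ++ [PySem.Str.strip l]) gs]
          simp only [List.map_cons, List.dropWhile_cons, hB, if_true]
        · rw [show pvLoopHeaders (l :: rest) "" det gs = pvLoopHeaders rest "" det gs by
              simp only [pvLoopHeaders]
              rw [pv_headerB_eq, if_neg hemp, if_neg hhd, if_neg hdash]]
          rw [ih det gs]
          simp only [List.map_cons, List.dropWhile_cons, hB, if_true]

lemma pv_inner2 (ls : List String) : ∀ (cur : List String) (gs : List (List String)), cur ≠ [] →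
    pvLoopFallback ls true cur gs =
      gs ++ ((cur ++ (pvTakeGroup ls).1) :: pvParseStarGroups (pvTakeGroup ls).2) := by
  induction ls with
  | nil => intro cur gs h; simp [pvLoopFallback, pvTakeGroup, pvParseStarGroups, h]
  | cons l rest ih =>
    intro cur gs h
    by_cases hst : PySem.Chars.startswith (PySem.Chars.strip l.toList) ['*'] = true
    · rw [show pvLoopFallback (l :: rest) true cur gs
            = pvLoopFallback rest true [l] (gs ++ [cur]) by simp [pvLoopFallback, hst, h]]
      rw [ih [l] (gs ++ [cur]) (by simp)]
      simp [pvTakeGroup, hst, pvParseStarGroups]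
    · have hsw : PySem.Chars.startswith [] ['*'] = false := by decide
      by_cases hne : PySem.Str.strip l = ""
      · rw [show pvLoopFallback (l :: rest) true cur gs = pvLoopFallback rest true cur gs by
            simp [pvLoopFallback, hne, hsw]]
        rw [ih cur gs h]
        simp [pvTakeGroup, hne, hsw]
      · rw [show pvLoopFallback (l :: rest) true cur gs
              = pvLoopFallback rest true (cur ++ [l]) gs by simp [pvLoopFallback, hst, hne]]
        rw [ih (cur ++ [l]) gs (by simp)]
        simp [pvTakeGroup, hst, hne]

lemma pv_outer2 (ls : List String) : ∀ (gs : List (List String)),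
    pvLoopFallback ls false [] gs =
      gs ++ pvParseStarGroups (ls.dropWhile (fun l => !PySem.Str.startswith (PySem.Str.strip l) "*")) := by
  induction ls with
  | nil => intro gs; simp [pvLoopFallback, pvParseStarGroups]
  | cons l rest ih =>
    intro gs
    by_cases hst : PySem.Chars.startswith (PySem.Chars.strip l.toList) ['*'] = true
    · rw [show pvLoopFallback (l :: rest) false [] gs = pvLoopFallback rest true [l] gs by
          simp [pvLoopFallback, hst]]
      rw [pv_inner2 rest [l] gs (by simp)]
      simp [hst, pvParseStarGroups]
    · rw [show pvLoopFallback (l :: rest) false [] gs = pvLoopFallback rest false [] gs by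
          simp [pvLoopFallback, hst]]
      rw [ih gs]
      simp [hst]

-- ===== VERDICT (by name: the statement is the Claim_ definition above) =====
theorem parse_certifications_spec : Claim_equal_parse_certifications := by
  intro content _
  unfold Spec_parse_certifications parse_certifications parse_certifications_alt
  have hc : (((PySem.Str.split? content "\n").getD []).map PySem.Str.strip).any
        (fun s => PySem.Str.startswith s "- ")
      = ((PySem.Str.split? content "\n").getD []).any
        (fun l => PySem.Str.startswith (PySem.Str.strip l) "- ") := by
    simp [List.any_map, Function.comp_def]
  simp only [hc]
  split_ifs with h
  · simpa using pv_outer1 ((PySem.Str.split? content "\n").getD []) [] []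
  · simpa using pv_outer2 ((PySem.Str.split? content "\n").getD []) []
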